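-- pv_equiv track=rewrite | github.com/Dr0x3525/Proyecto-final-programacion | ejercicios_parciales/ejercicio_parcial_2/ejercicio2.py | encontrar_fibbonacci_mayor
-- ===== SOURCE A (Python) =====
-- def comprobar_ser_fibbonaci(numero):
--     numero = int(numero)
--     f1 = 0
--     f2 = 1
--     while f1 <= numero:
--         if f1 == numero:
--             return True
--         temp =  f1
--         f1 = f2
--         f2 = f1 + temp
--     return False
--
-- def encontrar_fibbonacci_mayor(vector):
--     fib_mayor = None
--     indice_mayor = None
--     for indice in range(len(vector)):
--         if comprobar_ser_fibbonaci(vector[indice]):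
--             if fib_mayor == None:
--                 fib_mayor = vector[indice]
--                 indice_mayor = indice
--             else:
--                 if fib_mayor < vector[indice]:
--                     fib_mayor = vector[indice]
--                     indice_mayor = indice
--     return fib_mayor, indice_mayor
-- ===== SOURCE B (Python) =====
-- def encontrar_fibbonacci_mayor(vector):
--     # Build the set of Fibonacci numbers up to max(vector) ONCE, then pick the
--     # largest Fibonacci element (first index on ties) with one max() call.
--     fibs = set()
--     a, b = 0, 1
--     if vector:
--         tope = max(vector)
--         while a <= tope:
--             fibs.add(a)
--             a, b = b, a + b
--     candidatos = [(x, i) for i, x in enumerate(vector) if x in fibs]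
--     if not candidatos:
--         return None, None
--     return max(candidatos, key=lambda p: p[0])
-- ===== Notes on version B (the rewrite author's own statement) =====
-- stated objective: faster
-- what changed: B builds the set of Fibonacci numbers up to max(vector) once instead of regenerating the Fibonacci sequence for every element, then picks the result with one filter + max(key) pass (first index on ties).
import Mathlib
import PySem

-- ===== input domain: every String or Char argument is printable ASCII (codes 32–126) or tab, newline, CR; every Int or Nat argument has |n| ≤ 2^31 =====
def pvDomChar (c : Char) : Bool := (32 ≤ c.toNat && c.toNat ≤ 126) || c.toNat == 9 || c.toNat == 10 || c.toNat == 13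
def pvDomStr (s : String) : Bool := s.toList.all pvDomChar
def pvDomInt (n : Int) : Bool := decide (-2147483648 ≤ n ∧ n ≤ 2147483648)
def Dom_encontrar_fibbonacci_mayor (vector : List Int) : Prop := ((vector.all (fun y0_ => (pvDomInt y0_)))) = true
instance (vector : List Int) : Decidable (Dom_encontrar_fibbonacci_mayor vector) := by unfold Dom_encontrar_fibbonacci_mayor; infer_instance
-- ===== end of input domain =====

-- B replaces A's per-element regeneration of the Fibonacci sequence by ONE Fibonacci set
-- built up to max(vector), then selects the answer with a single filter + max pass (same
-- return value, first index on ties).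

-- ===== PORT A =====
-- while f1 <= numero: … ; fuel numero.toNat + 2 always suffices (the loop exits within
-- numero + 2 iterations since the second component grows at least by one per step)
def fibLoop : Nat → Int → Int → Int → Bool
  | 0, _, _, _ => false
  | fuel+1, numero, f1, f2 =>
    if f1 ≤ numero then
      if f1 = numero then true
      else fibLoop fuel numero f2 (f2 + f1)
    else false

def comprobar_ser_fibbonaci (numero : Int) : Bool :=
  fibLoop (numero.toNat + 2) numero 0 1

def encontrar_fibbonacci_mayor (vector : List Int) : Option Int × Option Int :=
  (PySem.List.enumerate vector).foldl
    (fun st p =>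
      if comprobar_ser_fibbonaci p.2 then
        match st.1 with
        | none => (some p.2, some p.1)
        | some fm => if fm < p.2 then (some p.2, some p.1) else st
      else st)
    (none, none)

-- ===== PORT B =====
-- while a <= tope: fibs.add(a); a, b = b, a + b  — fuel tope.toNat + 2 always suffices
def fibSetLoop : Nat → Int → Int → Int → PySem.Set Int → PySem.Set Int
  | 0, _, _, _, s => s
  | fuel+1, tope, a, b, s =>
    if a ≤ tope then fibSetLoop fuel tope b (a + b) (PySem.Set.add s a) else s

def encontrar_fibbonacci_mayor_alt (vector : List Int) : Option Int × Option Int :=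
  let fibs : PySem.Set Int :=
    match PySem.List.max? vector (fun x => x) with
    | none => PySem.Set.empty
    | some tope => fibSetLoop (tope.toNat + 2) tope 0 1 PySem.Set.empty
  let candidatos : List (Int × Int) :=
    ((PySem.List.enumerate vector).filter (fun p => PySem.Set.contains fibs p.2)).map
      (fun p => (p.2, p.1))
  match candidatos with
  | [] => (none, none)
  | c :: cs =>
    let m := cs.foldl (fun best p => if p.1 > best.1 then p else best) c
    (some m.1, some m.2)

-- ===== PRECONDITION & SPEC =====
def Spec_encontrar_fibbonacci_mayor (vector : List Int) (out : Option Int × Option Int) : Prop := out = encontrar_fibbonacci_mayor_alt vector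
instance (vector : List Int) (out : Option Int × Option Int) : Decidable (Spec_encontrar_fibbonacci_mayor vector out) := by unfold Spec_encontrar_fibbonacci_mayor; infer_instance

-- ===== CLAIM (what is proved, stated in full; the proofs are below) =====
def Claim_equal_encontrar_fibbonacci_mayor : Prop := ∀ (vector : List Int), Dom_encontrar_fibbonacci_mayor vector → Spec_encontrar_fibbonacci_mayor vector (encontrar_fibbonacci_mayor vector)

-- ===== LEMMAS AND PROOFS =====

def fibI (k : Nat) : Int := (Nat.fib k : Int)

lemma fibI_step (i : Nat) : fibI (i+1) + fibI i = fibI (i+2) := by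
  simp only [fibI, Nat.fib_add_two]; push_cast; ring

lemma fibI_step' (i : Nat) : fibI i + fibI (i+1) = fibI (i+2) := by
  rw [add_comm]; exact fibI_step i

lemma fibI_nonneg (k : Nat) : 0 ≤ fibI k := Int.natCast_nonneg _

lemma fibI_mono {i j : Nat} (h : i ≤ j) : fibI i ≤ fibI j := by
  simpa [fibI] using Int.ofNat_le.mpr (Nat.fib_mono h)

lemma fibLoop_true_ex : ∀ (fuel i : Nat) (n : Int),
    fibLoop fuel n (fibI i) (fibI (i+1)) = true → ∃ k, fibI k = n := by
  intro fuel
  induction fuel with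
  | zero => intro i n h; simp [fibLoop] at h
  | succ m ih =>
    intro i n h
    rw [fibLoop] at h
    by_cases h1 : fibI i ≤ n
    · rw [if_pos h1] at h
      by_cases h2 : fibI i = n
      · exact ⟨i, h2⟩
      · rw [if_neg h2] at h
        rw [fibI_step i] at h
        exact ih (i+1) n h
    · rw [if_neg h1] at h; exact absurd h (by simp)

lemma fibLoop_complete : ∀ (k fuel i : Nat) (n : Int),
    fibI (i + k) = n → k + 1 ≤ fuel →
    fibLoop fuel n (fibI i) (fibI (i+1)) = true := by
  intro k
  induction k with
  | zero =>
    intro fuel i n hn hf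
    cases fuel with
    | zero => omega
    | succ m =>
      rw [fibLoop]
      have : fibI i = n := by simpa using hn
      rw [if_pos (le_of_eq this), if_pos this]
  | succ k ih =>
    intro fuel i n hn hf
    cases fuel with
    | zero => omega
    | succ m =>
      rw [fibLoop]
      have hle : fibI i ≤ n := hn ▸ fibI_mono (by omega)
      rw [if_pos hle]
      by_cases h2 : fibI i = n
      · rw [if_pos h2]
      · rw [if_neg h2, fibI_step i]
        exact ih m (i+1) n (by rw [← hn]; congr 1; omega) (by omega)

lemma comprobar_iff (x : Int) :
    comprobar_ser_fibbonaci x = true ↔ ∃ k, fibI k = x := by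
  constructor
  · intro h
    exact fibLoop_true_ex (x.toNat + 2) 0 x (by simpa [fibI] using h)
  · rintro ⟨k, hk⟩
    have hnn : 0 ≤ x := hk ▸ fibI_nonneg k
    have hfib : x.toNat = Nat.fib k := by
      have := hk; simp only [fibI] at this; omega
    have hfuel : k + 1 ≤ x.toNat + 2 := by
      have := Nat.le_fib_add_one k; omega
    have := fibLoop_complete k (x.toNat + 2) 0 x (by simpa using hk) hfuel
    simpa [comprobar_ser_fibbonaci, fibI] using this

lemma mem_fibSetLoop : ∀ (fuel i : Nat) (tope x : Int) (s : PySem.Set Int),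
    (∀ k : Nat, i ≤ k → fibI k ≤ tope → k - i + 1 ≤ fuel) →
    (x ∈ fibSetLoop fuel tope (fibI i) (fibI (i+1)) s ↔
      x ∈ s ∨ ∃ k, i ≤ k ∧ fibI k = x ∧ fibI k ≤ tope) := by
  intro fuel
  induction fuel with
  | zero =>
    intro i tope x s hfuel
    simp only [fibSetLoop]
    constructor
    · exact Or.inl
    · rintro (h | ⟨k, hik, _, hkt⟩)
      · exact h
      · exact absurd (hfuel k hik hkt) (by omega)
  | succ m ih =>
    intro i tope x s hfuel
    rw [fibSetLoop]
    by_cases h1 : fibI i ≤ tope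
    · rw [if_pos h1, fibI_step' i]
      rw [ih (i+1) tope x _ (fun k hk hkt => by have := hfuel k (by omega) hkt; omega)]
      rw [PySem.Set.mem_add]
      constructor
      · rintro ((hs | hx) | ⟨k, hik, hkx, hkt⟩)
        · exact Or.inl hs
        · exact Or.inr ⟨i, le_refl i, hx.symm, h1⟩
        · exact Or.inr ⟨k, by omega, hkx, hkt⟩
      · rintro (hs | ⟨k, hik, hkx, hkt⟩)
        · exact Or.inl (Or.inl hs)
        · rcases Nat.eq_or_lt_of_le hik with rfl | hlt
          · exact Or.inl (Or.inr hkx.symm)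
          · exact Or.inr ⟨k, by omega, hkx, hkt⟩
    · rw [if_neg h1]
      constructor
      · exact Or.inl
      · rintro (h | ⟨k, hik, _, hkt⟩)
        · exact h
        · exact absurd (le_trans (fibI_mono hik) hkt) h1
 
lemma contains_fibSet (tope x : Int) (hx : x ≤ tope) :
    PySem.Set.contains (fibSetLoop (tope.toNat + 2) tope 0 1 PySem.Set.empty) x
      = comprobar_ser_fibbonaci x := by
  rw [Bool.eq_iff_iff, comprobar_iff]
  have hmem : x ∈ fibSetLoop (tope.toNat + 2) tope 0 1 PySem.Set.empty ↔
      x ∈ (PySem.Set.empty : PySem.Set Int) ∨ ∃ k, 0 ≤ k ∧ fibI k = x ∧ fibI k ≤ tope := by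
    have := mem_fibSetLoop (tope.toNat + 2) 0 tope x PySem.Set.empty
      (fun k _ hkt => by
        have h1 := Nat.le_fib_add_one k
        have h2 : (Nat.fib k : Int) ≤ tope := hkt
        omega)
    simpa [fibI] using this
  constructor
  · intro h
    have := hmem.mp (by simpa using (List.contains_iff_mem.mp h))
    rcases this with h' | ⟨k, _, hkx, _⟩
    · simp [PySem.Set.empty] at h'
    · exact ⟨k, hkx⟩
  · rintro ⟨k, hk⟩
    apply List.contains_iff_mem.mpr
    exact hmem.mpr (Or.inr ⟨k, Nat.zero_le k, hk, hk ▸ hx⟩)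

lemma foldA_some (l : List (Int × Int)) (v i : Int) :
    l.foldl
      (fun st p =>
        if comprobar_ser_fibbonaci p.2 then
          match st.1 with
          | none => (some p.2, some p.1)
          | some fm => if fm < p.2 then (some p.2, some p.1) else st
        else st)
      ((some v, some i) : Option Int × Option Int)
    = (fun m : Int × Int => (some m.1, some m.2))
        (((l.filter (fun p => comprobar_ser_fibbonaci p.2)).map (fun p => (p.2, p.1))).foldl
          (fun best p => if p.1 > best.1 then p else best) (v, i)) := by
  induction l generalizing v i with
  | nil => rfl
  | cons p l ih =>
    by_cases hb : comprobar_ser_fibbonaci p.2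
    · simp only [List.foldl_cons, List.filter_cons, hb, if_true, List.map_cons]
      by_cases hlt : v < p.2
      · simpa [hlt] using ih p.2 p.1
      · simpa [hlt] using ih v i
    · simp only [List.foldl_cons, List.filter_cons, hb]
      simpa using ih v i

lemma foldA_none (l : List (Int × Int)) :
    l.foldl
      (fun st p =>
        if comprobar_ser_fibbonaci p.2 then
          match st.1 with
          | none => (some p.2, some p.1)
          | some fm => if fm < p.2 then (some p.2, some p.1) else st
        else st)
      ((none, none) : Option Int × Option Int)
    = (match (l.filter (fun p => comprobar_ser_fibbonaci p.2)).map (fun p => (p.2, p.1)) with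
       | [] => ((none, none) : Option Int × Option Int)
       | c :: cs =>
         (fun m : Int × Int => (some m.1, some m.2))
           (cs.foldl (fun best p => if p.1 > best.1 then p else best) c)) := by
  induction l with
  | nil => rfl
  | cons p l ih =>
    by_cases hb : comprobar_ser_fibbonaci p.2
    · simp only [List.foldl_cons, List.filter_cons, hb, if_true, List.map_cons]
      simpa using foldA_some l p.2 p.1
    · simp only [List.foldl_cons, List.filter_cons, hb]
      simpa using ih

lemma snd_mem_of_mem_enumerate {vector : List Int} {p : Int × Int}
    (hp : p ∈ PySem.List.enumerate vector) : p.2 ∈ vector := by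
  have := PySem.List.map_snd_enumerate vector 0
  exact this ▸ List.mem_map_of_mem hp

-- ===== VERDICT (by name: the statement is the Claim_ definition above) =====
theorem encontrar_fibbonacci_mayor_spec : Claim_equal_encontrar_fibbonacci_mayor := by
  intro vector _
  unfold Spec_encontrar_fibbonacci_mayor encontrar_fibbonacci_mayor encontrar_fibbonacci_mayor_alt
  cases hmax : PySem.List.max? vector (fun x => x) with
  | none =>
    have hnil : vector = [] := (PySem.List.max?_eq_none_iff vector (fun x => x)).mp hmax
    subst hnil
    rfl
  | some tope =>
    simp only []
    have hfilter :
        (PySem.List.enumerate vector).filter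
            (fun p => PySem.Set.contains (fibSetLoop (tope.toNat + 2) tope 0 1 PySem.Set.empty) p.2)
          = (PySem.List.enumerate vector).filter (fun p => comprobar_ser_fibbonaci p.2) := by
      apply List.filter_congr
      intro p hp
      exact contains_fibSet tope p.2
        (PySem.List.max?_isMax hmax p.2 (snd_mem_of_mem_enumerate hp))
    rw [hfilter]
    exact foldA_none (PySem.List.enumerate vector)
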